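-- pv_equiv track=rewrite | github.com/kuzmiigo/advent-of-code | 2020/19/prog.py | parse
-- ===== SOURCE A (Python) =====
-- def parse(lines):
--     rules = {}
--     messages = []
--     mode = 0
--     for line in lines:
--         line = line.strip()
--         if not line:
--             mode += 1
--             continue
--         if mode == 0:
--             i, rule = line.split(': ')
--             if rule.startswith('"'):
--                 resolved, val = True, rule[1]
--             else:
--                 resolved, val = False, rule
--             rules[i] = (resolved, val)
--         else:
--             messages.append(line)
--     return rules, messages
-- ===== SOURCE B (Python) =====
-- def parse(lines):
--     stripped = [l.strip() for l in lines]
--     try: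
--         cut = stripped.index('')
--     except ValueError:
--         cut = len(stripped)
--     rules = {}
--     for line in stripped[:cut]:
--         i, rule = line.split(': ')
--         rules[i] = (True, rule[1]) if rule.startswith('"') else (False, rule)
--     messages = [l for l in stripped[cut:] if l]
--     return rules, messages
-- ===== Notes on version B (the rewrite author's own statement) =====
-- stated objective: simpler
-- what changed: Replaces A's single-pass mode state machine with a two-phase decomposition: strip all lines once, locate the first blank line with list.index, parse the rule section before it, and filter the non-empty lines after it as messages.
import Mathlib
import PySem

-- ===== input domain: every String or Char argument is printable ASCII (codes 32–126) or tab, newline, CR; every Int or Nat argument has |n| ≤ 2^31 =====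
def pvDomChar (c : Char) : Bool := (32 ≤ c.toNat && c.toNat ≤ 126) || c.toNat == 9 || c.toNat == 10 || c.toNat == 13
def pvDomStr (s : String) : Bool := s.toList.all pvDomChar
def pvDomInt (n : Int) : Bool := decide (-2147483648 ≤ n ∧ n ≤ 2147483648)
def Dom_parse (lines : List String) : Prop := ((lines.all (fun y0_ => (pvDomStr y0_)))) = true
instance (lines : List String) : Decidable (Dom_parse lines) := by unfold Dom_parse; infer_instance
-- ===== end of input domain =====

-- B replaces A's single-pass mode state machine by a split-at-first-blank decomposition; same return value on Pre_.


-- ===== PORT A =====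
-- one iteration of A's for-loop; the state is (rules dict, messages, mode)
def parseStep (st : PySem.Dict String (Bool × String) × List String × Int) (line0 : String) :
    PySem.Dict String (Bool × String) × List String × Int :=
  let line := PySem.Str.strip line0
  if line = "" then (st.1, st.2.1, st.2.2 + 1)
  else if st.2.2 = 0 then
    match PySem.Str.split? line ": " with
    | some [i, rule] =>
      if PySem.Str.startswith rule "\"" then
        match PySem.Str.pyGet? rule 1 with
        | some c => (st.1.insert i (true, String.ofList [c]), st.2.1, st.2.2)
        | none => st          -- Python: IndexError on rule[1]; excluded by Pre_parse
      else (st.1.insert i (false, rule), st.2.1, st.2.2)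
    | _ => st                 -- Python: ValueError unpacking split(': '); excluded by Pre_parse
  else (st.1, st.2.1 ++ [line], st.2.2)

def parse (lines : List String) : (List (String × Bool × String)) × List String :=
  let st := lines.foldl parseStep (PySem.Dict.empty, [], 0)
  (st.1.items, st.2.1)

-- ===== PORT B =====
-- B's rule-section loop body
def ruleAdd (rules : PySem.Dict String (Bool × String)) (line : String) :
    PySem.Dict String (Bool × String) :=
  match PySem.Str.split? line ": " with
  | some [i, rule] =>
    if PySem.Str.startswith rule "\"" then
      match PySem.Str.pyGet? rule 1 with
      | some c => rules.insert i (true, String.ofList [c])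
      | none => rules         -- Python: IndexError on rule[1]; excluded by Pre_parse
    else rules.insert i (false, rule)
  | _ => rules                -- Python: ValueError unpacking split(': '); excluded by Pre_parse

def parse_alt (lines : List String) : (List (String × Bool × String)) × List String :=
  let stripped := lines.map PySem.Str.strip
  let cut := (PySem.List.index? stripped "").getD stripped.length
  let rules := (stripped.take cut).foldl ruleAdd PySem.Dict.empty
  let messages := (stripped.drop cut).filter (fun l => l ≠ "")
  (rules.items, messages)

-- ===== PRECONDITION & SPEC =====
-- a stripped rule line must split on ': ' into exactly two parts, and a quoted rule body needs a char at index 1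
def ruleOk (line : String) : Bool :=
  match PySem.Str.split? line ": " with
  | some [_, rule] => !(PySem.Str.startswith rule "\"") || 2 ≤ PySem.Str.len rule
  | _ => false

-- Pre_parse = exactly the inputs where Python A returns: every (stripped) line before the first blank one
-- splits on ': ' into exactly two parts and, if its rule part starts with '"', has a second character.
def Pre_parse (lines : List String) : Prop :=
  ((lines.map PySem.Str.strip).take
      ((PySem.List.index? (lines.map PySem.Str.strip) "").getD lines.length)).all ruleOk = true
instance (lines : List String) : Decidable (Pre_parse lines) := by unfold Pre_parse; infer_instance

def pvWitness_parse : List String := ["0: \"a\"", " 1: 0 2 ", "", "abab", "", " ba "]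

def Spec_parse (lines : List String) (out : (List (String × Bool × String)) × List String) : Prop := out = parse_alt lines
instance (lines : List String) (out : (List (String × Bool × String)) × List String) : Decidable (Spec_parse lines out) := by unfold Spec_parse; infer_instance

-- ===== CLAIM (what is proved, stated in full; the proofs are below) =====
def Claim_equal_parse : Prop := ∀ (lines : List String), Dom_parse lines → Pre_parse lines → Spec_parse lines (parse lines)

-- ===== LEMMAS AND PROOFS =====

-- once A's mode is positive, the remaining lines only append their non-empty stripped forms to messages
theorem parse_msg_mode (ls : List String) :
    ∀ (d : PySem.Dict String (Bool × String)) (msgs : List String) (m : Int), 0 < m →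
      (ls.foldl parseStep (d, msgs, m)).1 = d ∧
      (ls.foldl parseStep (d, msgs, m)).2.1 = msgs ++ (ls.map PySem.Str.strip).filter (fun l => l ≠ "") := by
  induction ls with
  | nil => intro d msgs m _; simp
  | cons l rest ih =>
    intro d msgs m hm
    by_cases hs : PySem.Str.strip l = ""
    · have hstep : parseStep (d, msgs, m) l = (d, msgs, m + 1) := by
        simp [parseStep, hs]
      simp only [List.foldl_cons, hstep]
      rcases ih d msgs (m + 1) (by omega) with ⟨h1, h2⟩
      refine ⟨h1, ?_⟩
      simp [h2, hs]
    · have hstep : parseStep (d, msgs, m) l = (d, msgs ++ [PySem.Str.strip l], m) := by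
        simp only [parseStep]
        rw [if_neg hs, if_neg (by omega : ¬ m = 0)]
      simp only [List.foldl_cons, hstep]
      rcases ih d (msgs ++ [PySem.Str.strip l]) m hm with ⟨h1, h2⟩
      refine ⟨h1, ?_⟩
      simp [h2, hs]

-- in mode 0, a non-blank line is handled exactly by B's ruleAdd
theorem parseStep_rule (d : PySem.Dict String (Bool × String)) (msgs : List String) (l : String)
    (hs : PySem.Str.strip l ≠ "") :
    parseStep (d, msgs, 0) l = (ruleAdd d (PySem.Str.strip l), msgs, 0) := by
  simp only [parseStep, ruleAdd, if_neg hs]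
  cases PySem.Str.split? (PySem.Str.strip l) ": " with
  | none => simp
  | some parts =>
    match parts with
    | [] => simp
    | [_] => simp
    | [i, rule] =>
      cases h : PySem.List.pyGet? rule.toList 1 <;>
        by_cases hq : PySem.Chars.startswith rule.toList ['\"'] = true <;>
          simp [hq, h]
    | _ :: _ :: _ :: _ => simp

-- A's fold from mode 0 computes B's split-at-first-blank decomposition
theorem parse_mode0 (ls : List String) :
    ∀ (d : PySem.Dict String (Bool × String)) (msgs : List String),
      (ls.foldl parseStep (d, msgs, 0)).1 =
        (((ls.map PySem.Str.strip).take
            ((PySem.List.index? (ls.map PySem.Str.strip) "").getD (ls.map PySem.Str.strip).length)).foldl ruleAdd d) ∧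
      (ls.foldl parseStep (d, msgs, 0)).2.1 =
        msgs ++ ((ls.map PySem.Str.strip).drop
            ((PySem.List.index? (ls.map PySem.Str.strip) "").getD (ls.map PySem.Str.strip).length)).filter (fun l => l ≠ "") := by
  induction ls with
  | nil => intro d msgs; simp
  | cons l rest ih =>
    intro d msgs
    by_cases hs : PySem.Str.strip l = ""
    · have hstep : parseStep (d, msgs, 0) l = (d, msgs, 1) := by
        simp [parseStep, hs]
      have hidx : PySem.List.index? (PySem.Str.strip l :: rest.map PySem.Str.strip) "" = some 0 := by
        rw [hs]; exact PySem.List.index?_cons_self _ _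
      rcases parse_msg_mode rest d msgs 1 (by omega) with ⟨h1, h2⟩
      simp only [List.foldl_cons, hstep, List.map_cons, hidx]
      refine ⟨by simpa using h1, ?_⟩
      simp [h2, hs]
    · have hidx : PySem.List.index? (PySem.Str.strip l :: rest.map PySem.Str.strip) "" =
          (PySem.List.index? (rest.map PySem.Str.strip) "").map (· + 1) :=
        PySem.List.index?_cons_of_ne _ hs
      rcases ih (ruleAdd d (PySem.Str.strip l)) msgs with ⟨h1, h2⟩
      simp only [List.foldl_cons, parseStep_rule d msgs l hs, List.map_cons, hidx]
      constructor
      · rw [h1]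
        cases PySem.List.index? (rest.map PySem.Str.strip) "" <;> simp
      · rw [h2]
        cases PySem.List.index? (rest.map PySem.Str.strip) "" <;> simp

-- ===== VERDICT (by name: the statement is the Claim_ definition above) =====
theorem parse_spec : Claim_equal_parse := by
  intro lines _ _
  unfold Spec_parse parse parse_alt
  rcases parse_mode0 lines PySem.Dict.empty [] with ⟨h1, h2⟩
  simp only [List.length_map] at h1 h2 ⊢
  rw [h1, h2]
  simp
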